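-- pv_equiv track=rewrite | github.com/danielw98/jpeg-encoder | scripts/generate_test_images.py | generate_color_bars
-- ===== SOURCE A (Python) =====
-- def generate_color_bars(width, height):
--     """Generate SMPTE-style color bars"""
--     rgb = []
--     colors = [
--         (255, 255, 255),  # White
--         (255, 255, 0),    # Yellow
--         (0, 255, 255),    # Cyan
--         (0, 255, 0),      # Green
--         (255, 0, 255),    # Magenta
--         (255, 0, 0),      # Red
--         (0, 0, 255),      # Blue
--         (0, 0, 0),        # Black
--     ]
--
--     bar_width = width // len(colors)
--
--     for y in range(height):
--         for x in range(width):
--             bar_index = min(x // bar_width, len(colors) - 1)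
--             rgb.extend(colors[bar_index])
--
--     return rgb
-- ===== SOURCE B (Python) =====
-- COLORS = [
--     (255, 255, 255),  # White
--     (255, 255, 0),    # Yellow
--     (0, 255, 255),    # Cyan
--     (0, 255, 0),      # Green
--     (255, 0, 255),    # Magenta
--     (255, 0, 0),      # Red
--     (0, 0, 255),      # Blue
--     (0, 0, 0),        # Black
-- ]
--
-- def generate_color_bars(width, height):
--     """Generate SMPTE-style color bars.
--
--     Instead of computing a bar index per pixel, emit each bar as one block:
--     bars 0..6 are bar_width pixels wide, the last bar absorbs the remainder
--     (width - 7*bar_width pixels), exactly reproducing min(x // bar_width, 7).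
--     The row is built once and replicated height times."""
--     if height <= 0 or width <= 0:
--         return []
--     bar_width = width // len(COLORS)
--     row = []
--     for i, c in enumerate(COLORS):
--         count = bar_width if i < 7 else width - 7 * bar_width
--         row += list(c) * count
--     return row * height
-- ===== Notes on version B (the rewrite author's own statement) =====
-- stated objective: faster
-- what changed: B never computes a per-pixel bar index: it emits each of the 8 bars as one repeated block (bars 0-6 are bar_width wide, the last absorbs the remainder) to build a single row, then replicates that row height times; A's nested per-pixel loop with a division and min per pixel disappears.
import Mathlib
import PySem

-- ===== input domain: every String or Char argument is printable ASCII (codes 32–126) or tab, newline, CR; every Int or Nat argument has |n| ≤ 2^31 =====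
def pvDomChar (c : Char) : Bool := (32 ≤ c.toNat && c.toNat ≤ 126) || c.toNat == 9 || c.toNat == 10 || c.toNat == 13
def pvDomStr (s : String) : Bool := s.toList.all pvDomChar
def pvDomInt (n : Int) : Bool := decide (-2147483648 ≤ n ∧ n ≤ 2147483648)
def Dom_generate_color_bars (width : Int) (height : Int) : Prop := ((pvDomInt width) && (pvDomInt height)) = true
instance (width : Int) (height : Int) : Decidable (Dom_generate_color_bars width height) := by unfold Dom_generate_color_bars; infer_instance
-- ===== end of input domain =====

-- B emits each of the 8 bars as one repeated block and replicates the row height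
-- times, instead of A's per-pixel bar-index division (objective: faster, constant-factor).

-- the SMPTE color table shared by both programs (each RGB tuple flattened to a 3-element list)
def pvColors : List (List Int) :=
  [[255, 255, 255], [255, 255, 0], [0, 255, 255], [0, 255, 0],
   [255, 0, 255], [255, 0, 0], [0, 0, 255], [0, 0, 0]]

-- ===== PORT A =====
def generate_color_bars (width : Int) (height : Int) : List Int :=
  let bar_width := PySem.Int.floordiv width 8
  (PySem.List.pyRange 0 height 1).foldl (fun rgb _y =>
    (PySem.List.pyRange 0 width 1).foldl (fun rgb x =>
      rgb ++ PySem.List.pyGetD pvColors (min (PySem.Int.floordiv x bar_width) 7) []) rgb) []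

-- ===== PORT B =====
def generate_color_bars_alt (width : Int) (height : Int) : List Int :=
  if height ≤ 0 ∨ width ≤ 0 then []
  else
    let bar_width := PySem.Int.floordiv width 8
    let row := (PySem.List.enumerate pvColors 0).foldl (fun row ic =>
      row ++ PySem.List.pyRepeat ic.2 (if ic.1 < 7 then bar_width else width - 7 * bar_width)) []
    PySem.List.pyRepeat row height

-- ===== PRECONDITION & SPEC =====
-- Pre_ excludes exactly the inputs where Python A raises ZeroDivisionError
-- (1 ≤ width ≤ 7 with height ≥ 1: bar_width = 0 and the per-pixel division executes).
def Pre_generate_color_bars (width : Int) (height : Int) : Prop :=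
  ¬ (1 ≤ width ∧ width ≤ 7 ∧ 1 ≤ height)
instance (width : Int) (height : Int) : Decidable (Pre_generate_color_bars width height) := by
  unfold Pre_generate_color_bars; infer_instance
def pvWitness_generate_color_bars : Int × Int := (16, 2)

def Spec_generate_color_bars (width : Int) (height : Int) (out : List Int) : Prop :=
  out = generate_color_bars_alt width height
instance (width : Int) (height : Int) (out : List Int) : Decidable (Spec_generate_color_bars width height out) := by
  unfold Spec_generate_color_bars; infer_instance

-- ===== CLAIM (what is proved, stated in full; the proofs are below) =====
def Claim_equal_generate_color_bars : Prop := ∀ (width : Int) (height : Int), Dom_generate_color_bars width height → Pre_generate_color_bars width height → Spec_generate_color_bars width height (generate_color_bars width height)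

-- ===== LEMMAS AND PROOFS =====

-- a flatMap whose function is constant on the list flattens a replicate
theorem flatMap_const {α β : Type} (l : List α) (c : List β) (f : α → List β)
    (h : ∀ x ∈ l, f x = c) : l.flatMap f = (List.replicate l.length c).flatten := by
  induction l with
  | nil => rfl
  | cons a t ih => simp_all [List.replicate_succ]

-- a pyRange flatMap whose function is constant on the interval
theorem pyRange_flatMap_const (a b : Int) (c : List Int) (f : Int → List Int)
    (h : ∀ x, a ≤ x → x < b → f x = c) :
    (PySem.List.pyRange a b 1).flatMap f = (List.replicate (b - a).toNat c).flatten := by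
  rw [flatMap_const _ c f (fun x hx => by
    have := (PySem.List.mem_pyRange_one).mp hx; exact h x this.1 this.2),
    PySem.List.length_pyRange_one]

-- ===== VERDICT (by name: the statement is the Claim_ definition above) =====
theorem generate_color_bars_spec : Claim_equal_generate_color_bars := by
  intro width height _ hpre
  unfold Spec_generate_color_bars generate_color_bars generate_color_bars_alt
  by_cases hh : height ≤ 0
  · simp [PySem.List.pyRange_one_eq_nil hh, if_pos (Or.inl hh)]
  · by_cases hw : width ≤ 0
    · simp [PySem.List.pyRange_one_eq_nil hw, List.foldl_fixed, if_pos (Or.inr hw)]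
    · -- main case: width ≥ 8, height ≥ 1
      have hw8 : 8 ≤ width := by unfold Pre_generate_color_bars at hpre; omega
      rw [if_neg (by omega)]
      set bw := PySem.Int.floordiv width 8 with hbw
      have hdm := PySem.Int.floordiv_mul_add_mod width 8
      have hm0 := PySem.Int.mod_nonneg width (b := 8) (by omega)
      have hm8 := PySem.Int.mod_lt width (b := 8) (by omega)
      have hbounds : 8 * bw ≤ width ∧ width < 8 * bw + 8 := by rw [hbw]; omega
      have hbwpos : 0 < bw := by omega
      -- the per-pixel color function
      set f : Int → List Int :=
        fun x => PySem.List.pyGetD pvColors (min (PySem.Int.floordiv x bw) 7) [] with hf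
      -- A = height copies of the flatMapped row
      simp only [PySem.List.foldl_append_eq_flatMap, List.nil_append]
      rw [flatMap_const _ ((PySem.List.pyRange 0 width 1).flatMap f) _
          (fun y _ => rfl), PySem.List.length_pyRange_one]
      -- B's row, unfolded to the 8 concrete blocks
      simp only [pvColors, PySem.List.enumerate]
      -- split A's row at the bar boundaries
      have hseg : ∀ i : Int, 0 ≤ i → i < 7 → ∀ x, i * bw ≤ x → x < (i + 1) * bw → f x =
          PySem.List.pyGetD pvColors i [] := by
        intro i hi0 hi7 x h1 h2
        have hd : PySem.Int.floordiv x bw = i :=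
          (PySem.Int.floordiv_eq_iff_of_pos hbwpos).mpr ⟨h1, h2⟩
        show PySem.List.pyGetD pvColors (min (PySem.Int.floordiv x bw) 7) [] = _
        rw [hd, min_eq_left (by omega)]
      have hlast : ∀ x, 7 * bw ≤ x → x < width → f x = [0, 0, 0] := by
        intro x h1 _
        have h7 : (7 : Int) ≤ PySem.Int.floordiv x bw :=
          (PySem.Int.le_floordiv_iff_mul_le hbwpos).mpr h1
        show PySem.List.pyGetD pvColors (min (PySem.Int.floordiv x bw) 7) [] = _
        rw [min_eq_right (by omega)]; rfl
      rw [PySem.List.pyRange_one_append 0 (1*bw) width (by omega) (by omega),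
          PySem.List.pyRange_one_append (1*bw) (2*bw) width (by omega) (by omega),
          PySem.List.pyRange_one_append (2*bw) (3*bw) width (by omega) (by omega),
          PySem.List.pyRange_one_append (3*bw) (4*bw) width (by omega) (by omega),
          PySem.List.pyRange_one_append (4*bw) (5*bw) width (by omega) (by omega),
          PySem.List.pyRange_one_append (5*bw) (6*bw) width (by omega) (by omega),
          PySem.List.pyRange_one_append (6*bw) (7*bw) width (by omega) (by omega)]
      simp only [List.flatMap_append]
      rw [show (0 : Int) = 0 * bw by ring]
      rw [pyRange_flatMap_const (0*bw) (1*bw) [255, 255, 255] f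
            (fun x h1 h2 => by rw [hseg 0 (by omega) (by omega) x (by omega) (by omega)]; decide),
          pyRange_flatMap_const (1*bw) (2*bw) [255, 255, 0] f
            (fun x h1 h2 => by rw [hseg 1 (by omega) (by omega) x (by omega) (by omega)]; decide),
          pyRange_flatMap_const (2*bw) (3*bw) [0, 255, 255] f
            (fun x h1 h2 => by rw [hseg 2 (by omega) (by omega) x (by omega) (by omega)]; decide),
          pyRange_flatMap_const (3*bw) (4*bw) [0, 255, 0] f
            (fun x h1 h2 => by rw [hseg 3 (by omega) (by omega) x (by omega) (by omega)]; decide),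
          pyRange_flatMap_const (4*bw) (5*bw) [255, 0, 255] f
            (fun x h1 h2 => by rw [hseg 4 (by omega) (by omega) x (by omega) (by omega)]; decide),
          pyRange_flatMap_const (5*bw) (6*bw) [255, 0, 0] f
            (fun x h1 h2 => by rw [hseg 5 (by omega) (by omega) x (by omega) (by omega)]; decide),
          pyRange_flatMap_const (6*bw) (7*bw) [0, 0, 255] f
            (fun x h1 h2 => by rw [hseg 6 (by omega) (by omega) x (by omega) (by omega)]; decide),
          pyRange_flatMap_const (7*bw) width [0, 0, 0] f
            (fun x h1 h2 => hlast x h1 h2)]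
      simp only [PySem.List.pyRepeat]
      simp only [show (1:Int)*bw - 0*bw = bw from by ring, show (2:Int)*bw - 1*bw = bw from by ring,
        show (3:Int)*bw - 2*bw = bw from by ring, show (4:Int)*bw - 3*bw = bw from by ring,
        show (5:Int)*bw - 4*bw = bw from by ring, show (6:Int)*bw - 5*bw = bw from by ring,
        show (7:Int)*bw - 6*bw = bw from by ring]
      norm_num [List.append_assoc]
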